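-- pv_equiv track=rewrite | github.com/ameen-91/exray | cluster.py | ensure_roles
-- ===== SOURCE A (Python) =====
-- from typing import Dict, List, Sequence
--
-- def ensure_roles(nodes: List[Dict[str, str]]) -> List[Dict[str, str]]:
--     filtered: List[Dict[str, str]] = []
--     seen: set[str] = set()
--     for node in nodes:
--         ip = node.get("ip", "").strip()
--         if not ip or ip in seen:
--             continue
--         seen.add(ip)
--         role = node.get("role", "worker").strip().lower()
--         filtered.append({"ip": ip, "role": role if role in {"master", "worker"} else "worker"})
--     if filtered:
--         filtered[0]["role"] = "master"
--         for entry in filtered[1:]: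
--             entry["role"] = "worker"
--     return filtered
-- ===== SOURCE B (Python) =====
-- def ensure_roles(nodes):
--     strips = [node.get("ip", "").strip() for node in nodes]
--
--     def dedup(ss):
--         if not ss:
--             return []
--         rest = dedup([s for s in ss[1:] if s != ss[0]])
--         return [ss[0]] + rest if ss[0] else rest
--
--     ips = dedup(strips)
--     roles = ["master"] + ["worker"] * (len(ips) - 1)
--     return [{"ip": ip, "role": role} for ip, role in zip(ips, roles)]
-- ===== Notes on version B (the rewrite author's own statement) =====
-- stated objective: alternative
-- what changed: B replaces A's iterative seen-set dedup with two-pass relabelling by a recursive nub that removes each kept head's duplicates from the tail by filtering (no auxiliary seen state), and assigns roles by zipping the deduped IPs against a prebuilt role list instead of mutating dicts in a second pass; A's in-loop role normalization is dead code and is dropped.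
import Mathlib
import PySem

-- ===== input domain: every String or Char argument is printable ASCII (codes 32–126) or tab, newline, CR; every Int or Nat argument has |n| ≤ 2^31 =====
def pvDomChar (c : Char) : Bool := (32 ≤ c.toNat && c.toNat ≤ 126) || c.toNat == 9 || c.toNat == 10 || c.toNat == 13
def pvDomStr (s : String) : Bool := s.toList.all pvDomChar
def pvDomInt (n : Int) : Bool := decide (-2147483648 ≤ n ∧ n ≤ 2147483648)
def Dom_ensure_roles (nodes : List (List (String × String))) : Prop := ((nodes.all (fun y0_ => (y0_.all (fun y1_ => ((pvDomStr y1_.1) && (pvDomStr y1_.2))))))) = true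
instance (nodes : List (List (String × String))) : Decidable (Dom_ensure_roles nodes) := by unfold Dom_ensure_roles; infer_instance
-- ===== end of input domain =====

-- B: recursive nub (filtering each kept head's duplicates out of the tail, no seen set)
-- plus role assignment by zipping the deduped ips against a prebuilt role list; A's
-- in-loop role normalization is dead code (always overwritten by the relabel pass).

-- ===== PORT A =====
def pvStepA (st : List (List (String × String)) × PySem.Set String)
    (node : List (String × String)) : List (List (String × String)) × PySem.Set String :=
  let ip := PySem.Str.strip ((PySem.Dict.mk node).getD "ip" "")
  if ip = "" ∨ st.2.contains ip then st
  else
    let role := PySem.Str.lower (PySem.Str.strip ((PySem.Dict.mk node).getD "role" "worker"))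
    (st.1 ++ [[("ip", ip), ("role", if role = "master" ∨ role = "worker" then role else "worker")]],
     PySem.Set.add st.2 ip)

def ensure_roles (nodes : List (List (String × String))) : List (List (String × String)) :=
  match (nodes.foldl pvStepA ([], PySem.Set.empty)).1 with
  | [] => []
  | f0 :: rest =>
      ((PySem.Dict.mk f0).insert "role" "master").items ::
      rest.map (fun e => ((PySem.Dict.mk e).insert "role" "worker").items)

-- ===== PORT B =====
-- Source B's recursive dedup: keep the head (if nonempty), filter its duplicates out of the tail
def pvDedup : List String → List String
  | [] => []
  | s :: ss =>
      let rest := pvDedup (ss.filter (fun t => t ≠ s))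
      if s ≠ "" then s :: rest else rest
termination_by l => l.length
decreasing_by
  simp
  exact le_trans (List.length_filter_le _ _) (le_of_eq (by simp))

def ensure_roles_alt (nodes : List (List (String × String))) : List (List (String × String)) :=
  let strips := nodes.map (fun node => PySem.Str.strip ((PySem.Dict.mk node).getD "ip" ""))
  let ips := pvDedup strips
  let roles := "master" :: List.replicate (ips.length - 1) "worker"
  (ips.zip roles).map (fun p => [("ip", p.1), ("role", p.2)])

-- ===== PRECONDITION & SPEC =====
def Spec_ensure_roles (nodes : List (List (String × String))) (out : List (List (String × String))) : Prop := out = ensure_roles_alt nodes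
instance (nodes : List (List (String × String))) (out : List (List (String × String))) : Decidable (Spec_ensure_roles nodes out) := by unfold Spec_ensure_roles; infer_instance

-- ===== CLAIM (what is proved, stated in full; the proofs are below) =====
def Claim_equal_ensure_roles : Prop := ∀ (nodes : List (List (String × String))), Dom_ensure_roles nodes → Spec_ensure_roles nodes (ensure_roles nodes)

-- ===== LEMMAS AND PROOFS =====

theorem pvDedup_nil : pvDedup [] = [] := by conv_lhs => unfold pvDedup

theorem pvDedup_cons (s : String) (ss : List String) :
    pvDedup (s :: ss) =
      if s ≠ "" then s :: pvDedup (ss.filter (fun t => t ≠ s))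
      else pvDedup (ss.filter (fun t => t ≠ s)) := by
  conv_lhs => unfold pvDedup

-- A's fold, abstracted to (ip, role) pairs
def pvStepP (st : List (String × String) × PySem.Set String)
    (node : List (String × String)) : List (String × String) × PySem.Set String :=
  let ip := PySem.Str.strip ((PySem.Dict.mk node).getD "ip" "")
  if ip = "" ∨ st.2.contains ip then st
  else
    let role := PySem.Str.lower (PySem.Str.strip ((PySem.Dict.mk node).getD "role" "worker"))
    (st.1 ++ [(ip, if role = "master" ∨ role = "worker" then role else "worker")], st.2.add ip)

def pvEntry (p : String × String) : List (String × String) := [("ip", p.1), ("role", p.2)]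

-- A's dedup, with its explicit seen set, over the stripped ip strings only
def pvDedupSeen : List String → PySem.Set String → List String
  | [], _ => []
  | s :: ss, seen =>
      if s = "" ∨ seen.contains s then pvDedupSeen ss seen
      else s :: pvDedupSeen ss (seen.add s)

theorem foldA_eq (nodes : List (List (String × String)))
    (prs : List (String × String)) (seen : PySem.Set String) :
    nodes.foldl pvStepA (prs.map pvEntry, seen) =
      ((nodes.foldl pvStepP (prs, seen)).1.map pvEntry, (nodes.foldl pvStepP (prs, seen)).2) := by
  induction nodes generalizing prs seen with
  | nil => simp
  | cons n ns ih =>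
      simp only [List.foldl_cons]
      by_cases h : PySem.Str.strip ((PySem.Dict.mk n).getD "ip" "") = "" ∨
          seen.contains (PySem.Str.strip ((PySem.Dict.mk n).getD "ip" ""))
      · simp only [pvStepA, pvStepP, if_pos h]
        exact ih prs seen
      · simp only [pvStepA, pvStepP, if_neg h]
        have := ih (prs ++ [(PySem.Str.strip ((PySem.Dict.mk n).getD "ip" ""),
          if PySem.Str.lower (PySem.Str.strip ((PySem.Dict.mk n).getD "role" "worker")) = "master" ∨
             PySem.Str.lower (PySem.Str.strip ((PySem.Dict.mk n).getD "role" "worker")) = "worker"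
          then PySem.Str.lower (PySem.Str.strip ((PySem.Dict.mk n).getD "role" "worker"))
          else "worker")]) (seen.add (PySem.Str.strip ((PySem.Dict.mk n).getD "ip" "")))
        simpa [pvEntry] using this

theorem foldP_fst (nodes : List (List (String × String)))
    (prs : List (String × String)) (seen : PySem.Set String) :
    (nodes.foldl pvStepP (prs, seen)).1.map Prod.fst =
      prs.map Prod.fst ++
        pvDedupSeen (nodes.map (fun node => PySem.Str.strip ((PySem.Dict.mk node).getD "ip" ""))) seen := by
  induction nodes generalizing prs seen with
  | nil => simp [pvDedupSeen]
  | cons n ns ih =>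
      simp only [List.foldl_cons, List.map_cons]
      by_cases h : PySem.Str.strip ((PySem.Dict.mk n).getD "ip" "") = "" ∨
          seen.contains (PySem.Str.strip ((PySem.Dict.mk n).getD "ip" ""))
      · simp only [pvStepP, pvDedupSeen, if_pos h]
        exact ih prs seen
      · simp only [pvStepP, pvDedupSeen, if_neg h]
        have := ih (prs ++ [(PySem.Str.strip ((PySem.Dict.mk n).getD "ip" ""),
          if PySem.Str.lower (PySem.Str.strip ((PySem.Dict.mk n).getD "role" "worker")) = "master" ∨
             PySem.Str.lower (PySem.Str.strip ((PySem.Dict.mk n).getD "role" "worker")) = "worker"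
          then PySem.Str.lower (PySem.Str.strip ((PySem.Dict.mk n).getD "role" "worker"))
          else "worker")]) (seen.add (PySem.Str.strip ((PySem.Dict.mk n).getD "ip" "")))
        simpa using this

-- empties are irrelevant on both sides
theorem dedupSeen_filter_empty (ss : List String) (seen : PySem.Set String) :
    pvDedupSeen ss seen = pvDedupSeen (ss.filter (fun t => t ≠ "")) seen := by
  induction ss generalizing seen with
  | nil => rfl
  | cons s ss ih =>
      by_cases hs : s = ""
      · subst hs
        simp [pvDedupSeen, ih]
      · by_cases hc : seen.contains s
        · simp [pvDedupSeen, hs, ih]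
        · simp [pvDedupSeen, hs, ih]

theorem dedup_filter_empty (ss : List String) :
    pvDedup ss = pvDedup (ss.filter (fun t => t ≠ "")) := by
  induction hn : ss.length using Nat.strong_induction_on generalizing ss with
  | _ n ih =>
    subst hn
    cases ss with
    | nil => rfl
    | cons s tl =>
        by_cases hs : s = ""
        · subst hs
          rw [pvDedup_cons]
          simp only [ne_eq, not_true_eq_false, if_false, List.filter_cons, decide_not,
            not_true_eq_false]
          simp
        · rw [pvDedup_cons]
          simp only [ne_eq, hs, not_false_eq_true, if_true]
          have hfc : (s :: tl).filter (fun t => t ≠ "") = s :: tl.filter (fun t => t ≠ "") := by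
            simp [hs]
          rw [hfc, pvDedup_cons]
          simp only [ne_eq, hs, not_false_eq_true, if_true]
          congr 1
          have hcomm : (tl.filter (fun t => t ≠ "")).filter (fun t => t ≠ s) =
              (tl.filter (fun t => t ≠ s)).filter (fun t => t ≠ "") := by
            rw [List.filter_filter, List.filter_filter]
            apply List.filter_congr
            intro t _; simp [Bool.and_comm]
          rw [hcomm]
          exact ih (tl.filter (fun t => t ≠ s)).length
            (Nat.lt_succ_of_le (List.length_filter_le _ tl)) _ rfl

-- on empty-free lists, A's seen-set dedup is B's nub restricted to unseen elements
theorem dedupSeen_eq_dedup_filter (ss : List String) (hne : ∀ t ∈ ss, t ≠ "")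
    (seen : PySem.Set String) :
    pvDedupSeen ss seen = pvDedup (ss.filter (fun t => ¬ seen.contains t)) := by
  induction hn : ss.length using Nat.strong_induction_on generalizing ss seen with
  | _ n ih =>
    subst hn
    cases ss with
    | nil => simp [pvDedupSeen, pvDedup_nil]
    | cons s tl =>
        have hs : s ≠ "" := hne s (by simp)
        by_cases hc : seen.contains s
        · rw [pvDedupSeen, if_pos (Or.inr hc)]
          have hfil : (s :: tl).filter (fun t => ¬ seen.contains t) =
              tl.filter (fun t => ¬ seen.contains t) := by
            simp [List.mem_of_elem_eq_true hc]
          rw [hfil]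
          exact ih tl.length (by simp) tl (fun t ht => hne t (by simp [ht])) seen rfl
        · have hc' : s ∉ seen := by simpa using hc
          rw [pvDedupSeen, if_neg (by simp [hs, hc'])]
          have hfil : (s :: tl).filter (fun t => ¬ seen.contains t) =
              s :: tl.filter (fun t => ¬ seen.contains t) := by
            simp [hc']
          rw [hfil, pvDedup_cons]
          simp only [ne_eq, hs, not_false_eq_true, if_true]
          congr 1
          have hfe : (tl.filter (fun t => ¬ seen.contains t)).filter (fun t => t ≠ s) =
              tl.filter (fun t => ¬ (seen.add s).contains t) := by
            rw [List.filter_filter]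
            apply List.filter_congr
            intro t _
            by_cases hts : t = s
            · subst hts
              simp [PySem.Set.mem_add]
            · simp [PySem.Set.mem_add, hts]
          rw [hfe]
          exact ih tl.length (by simp) tl (fun t ht => hne t (by simp [ht])) (seen.add s) rfl

theorem dedupSeen_empty_eq_dedup (ss : List String) :
    pvDedupSeen ss PySem.Set.empty = pvDedup ss := by
  rw [dedupSeen_filter_empty, dedup_filter_empty ss]
  rw [dedupSeen_eq_dedup_filter _ (by intro t ht; simpa using (List.mem_filter.mp ht).2)]
  congr 1
  rw [List.filter_filter]
  apply List.filter_congr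
  intro t _
  simp [PySem.Set.empty]

theorem insert_role_entry (p : String × String) (v : String) :
    ((PySem.Dict.mk (pvEntry p)).insert "role" v).items = [("ip", p.1), ("role", v)] := by
  simp [pvEntry, PySem.Dict.insert]

-- B's zip against ["master"] ++ workers: the worker tail
theorem zip_replicate_worker (ips : List String) :
    (ips.zip (List.replicate ips.length "worker")).map
        (fun p => [("ip", p.1), ("role", p.2)]) =
      ips.map (fun ip => [("ip", ip), ("role", "worker")]) := by
  induction ips with
  | nil => rfl
  | cons ip ips ih => simp [List.replicate_succ, ih]

-- ===== VERDICT (by name: the statement is the Claim_ definition above) =====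
theorem ensure_roles_spec : Claim_equal_ensure_roles := by
  intro nodes _
  unfold Spec_ensure_roles ensure_roles
  have halt : ensure_roles_alt nodes =
      ((pvDedup (nodes.map (fun node => PySem.Str.strip ((PySem.Dict.mk node).getD "ip" "")))).zip
        ("master" :: List.replicate
          ((pvDedup (nodes.map (fun node =>
            PySem.Str.strip ((PySem.Dict.mk node).getD "ip" "")))).length - 1) "worker")).map
        (fun p => [("ip", p.1), ("role", p.2)]) := rfl
  rw [halt, ← dedupSeen_empty_eq_dedup]
  have hF := foldP_fst nodes [] PySem.Set.empty
  simp only [List.map_nil, List.nil_append] at hF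
  rw [← hF]
  have hA := foldA_eq nodes [] PySem.Set.empty
  simp only [List.map_nil] at hA
  rw [hA]
  cases hp : (nodes.foldl pvStepP ([], PySem.Set.empty)).1 with
  | nil => rfl
  | cons p rest =>
      simp only [List.map_cons, List.length_cons, List.zip_cons_cons]
      rw [insert_role_entry]
      congr 1
      rw [show (rest.map Prod.fst).length + 1 - 1 = (rest.map Prod.fst).length by omega]
      rw [zip_replicate_worker]
      rw [List.map_map, List.map_map]
      apply List.map_congr_left
      intro q _
      simpa using insert_role_entry q "worker"
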